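-- pv_equiv track=rewrite | github.com/abramovychmax-cpu/under-preassure-tyre | verify_minimal.py | garmin_crc
-- ===== SOURCE A (Python) =====
-- def garmin_crc(data):
--     crc_table = [0x0000, 0xCC01, 0xD801, 0x1400, 0xF001, 0x3C00, 0x2800, 0xE401, 0xA001, 0x6C00, 0x7800, 0xB401, 0x5000, 0x9C01, 0x8801, 0x4400]
--     crc = 0
--     for byte in data:
--         tmp = crc_table[crc & 0xF]
--         crc = (crc >> 4) & 0x0FFF
--         crc = crc ^ tmp ^ crc_table[byte & 0xF]
--         tmp = crc_table[crc & 0xF]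
--         crc = (crc >> 4) & 0x0FFF
--         crc = crc ^ tmp ^ crc_table[(byte >> 4) & 0xF]
--     return crc
-- ===== SOURCE B (Python) =====
-- def garmin_crc(data):
--     # Canonical bit-by-bit reflected CRC-16 (poly 0xA001) instead of A's nibble table.
--     crc = 0
--     for byte in data:
--         crc ^= byte & 0xFF
--         for _ in range(8):
--             if crc & 1:
--                 crc = (crc >> 1) ^ 0xA001
--             else:
--                 crc >>= 1
--     return crc
-- ===== Notes on version B (the rewrite author's own statement) =====
-- stated objective: simpler
-- what changed: Replaces the 16-entry nibble-table CRC (two table lookups and two 4-bit shifts per byte) with the canonical bit-by-bit reflected CRC-16 loop (xor the byte in, then eight shift-and-conditionally-xor-0xA001 steps), maintaining only the crc integer and no table.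
import Mathlib
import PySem

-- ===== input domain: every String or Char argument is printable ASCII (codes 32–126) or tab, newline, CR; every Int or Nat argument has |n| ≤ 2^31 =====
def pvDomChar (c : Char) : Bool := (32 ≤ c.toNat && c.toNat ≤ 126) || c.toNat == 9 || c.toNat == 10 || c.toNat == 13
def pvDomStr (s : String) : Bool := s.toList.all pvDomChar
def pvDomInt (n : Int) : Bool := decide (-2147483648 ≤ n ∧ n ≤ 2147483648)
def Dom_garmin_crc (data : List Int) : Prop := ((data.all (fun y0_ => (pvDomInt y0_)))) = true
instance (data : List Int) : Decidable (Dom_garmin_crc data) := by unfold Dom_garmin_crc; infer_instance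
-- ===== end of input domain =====

-- B replaces A's 16-entry nibble-table CRC with the canonical bit-by-bit reflected
-- CRC-16 loop (poly 0xA001): simpler, no table. Equal return value on every input.

-- ===== PORT A =====
-- A's crc_table (a list literal in the Python source)
def crcTable : List Int :=
  [0x0000, 0xCC01, 0xD801, 0x1400, 0xF001, 0x3C00, 0x2800, 0xE401,
   0xA001, 0x6C00, 0x7800, 0xB401, 0x5000, 0x9C01, 0x8801, 0x4400]

-- one iteration of A's `for byte in data` body; indices `x & 0xF` are always in
-- 0..15, so `crc_table[i]` can never raise and pyGetD with default 0 is exact here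
def garminStep (crc byte : Int) : Int :=
  let tmp := PySem.List.pyGetD crcTable (PySem.Int.band crc 0xF) 0
  let crc := PySem.Int.band (crc >>> (4 : Nat)) 0x0FFF
  let crc := PySem.Int.bxor (PySem.Int.bxor crc tmp)
               (PySem.List.pyGetD crcTable (PySem.Int.band byte 0xF) 0)
  let tmp := PySem.List.pyGetD crcTable (PySem.Int.band crc 0xF) 0
  let crc := PySem.Int.band (crc >>> (4 : Nat)) 0x0FFF
  PySem.Int.bxor (PySem.Int.bxor crc tmp)
    (PySem.List.pyGetD crcTable (PySem.Int.band (byte >>> (4 : Nat)) 0xF) 0)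

def garmin_crc (data : List Int) : Int := data.foldl garminStep 0

-- ===== PORT B =====
-- one bit step of Source B's inner loop
def crcBitStep (crc : Int) : Int :=
  if PySem.Int.band crc 1 ≠ 0 then PySem.Int.bxor (crc >>> (1 : Nat)) 0xA001
  else crc >>> (1 : Nat)

-- Source B's `crc ^= byte & 0xFF; for _ in range(8): …`
def crcByteStep (crc byte : Int) : Int :=
  (PySem.List.pyRange 0 8 1).foldl (fun c _ => crcBitStep c)
    (PySem.Int.bxor crc (PySem.Int.band byte 0xFF))

def garmin_crc_alt (data : List Int) : Int := data.foldl crcByteStep 0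

-- ===== PRECONDITION & SPEC =====
def Spec_garmin_crc (data : List Int) (out : Int) : Prop := out = garmin_crc_alt data
instance (data : List Int) (out : Int) : Decidable (Spec_garmin_crc data out) := by unfold Spec_garmin_crc; infer_instance

-- ===== CLAIM (what is proved, stated in full; the proofs are below) =====
def Claim_equal_garmin_crc : Prop := ∀ (data : List Int), Dom_garmin_crc data → Spec_garmin_crc data (garmin_crc data)

-- ===== LEMMAS AND PROOFS =====

-- Nat-level shadows of the two byte steps
def tblN : List Nat :=
  [0x0000, 0xCC01, 0xD801, 0x1400, 0xF001, 0x3C00, 0x2800, 0xE401,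
   0xA001, 0x6C00, 0x7800, 0xB401, 0x5000, 0x9C01, 0x8801, 0x4400]

def TfN (r : Nat) : Nat := tblN.getD r 0

def stepAN (c n : Nat) : Nat :=
  let c1 := ((c >>> 4) % 4096) ^^^ TfN (c % 16) ^^^ TfN (n % 16)
  ((c1 >>> 4) % 4096) ^^^ TfN (c1 % 16) ^^^ TfN ((n >>> 4) % 16)

def bsN (x : Nat) : Nat := if x % 2 = 1 then (x >>> 1) ^^^ 40961 else x >>> 1

def bs4N (x : Nat) : Nat := bsN (bsN (bsN (bsN x)))

-- table lookup as a function of the Nat index (indices are always < 16)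
lemma tbl_get (k : Nat) (hk : k < 16) :
    PySem.List.pyGetD crcTable (k : Int) 0 = (TfN k : Int) := by
  interval_cases k <;> rfl

lemma TfN_lt (r : Nat) (h : r < 16) : TfN r < 65536 := by
  interval_cases r <;> decide

-- TfN is GF(2)-linear on 4-bit inputs
lemma TfN_xor (a b : Nat) (ha : a < 16) (hb : b < 16) :
    TfN (a ^^^ b) = TfN a ^^^ TfN b := by
  interval_cases a <;> interval_cases b <;> decide

lemma xor_cancel (a b c : Nat) : (a ^^^ c) ^^^ (b ^^^ c) = a ^^^ b := by
  rw [Nat.xor_comm b c, ← Nat.xor_assoc, Nat.xor_assoc a c c, Nat.xor_self, Nat.xor_zero]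

-- bsN is GF(2)-linear
lemma bsN_xor (x y : Nat) : bsN (x ^^^ y) = bsN x ^^^ bsN y := by
  have hm : (x ^^^ y) % 2 = x % 2 ^^^ y % 2 := by
    simpa using Nat.xor_mod_two_pow (a := x) (b := y) (n := 1)
  have hs : (x ^^^ y) >>> 1 = x >>> 1 ^^^ y >>> 1 := Nat.shiftRight_xor_distrib
  rcases Nat.mod_two_eq_zero_or_one x with hx | hx <;>
    rcases Nat.mod_two_eq_zero_or_one y with hy | hy <;>
      simp [bsN, hm, hs, hx, hy] <;>
        first
          | ac_rfl
          | rw [xor_cancel, Nat.xor_comm]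

lemma bs4N_xor (x y : Nat) : bs4N (x ^^^ y) = bs4N x ^^^ bs4N y := by
  simp [bs4N, bsN_xor]

lemma bsN_even (q : Nat) : bsN (2 * q) = q := by
  have h : (2 * q) % 2 = 0 := by omega
  have h2 : (2 * q) >>> 1 = q := by rw [Nat.shiftRight_eq_div_pow]; omega
  simp [bsN, h, h2]

lemma bs4N_mul16 (q : Nat) : bs4N (16 * q) = q := by
  unfold bs4N
  rw [show 16 * q = 2 * (8 * q) by ring, bsN_even,
      show 8 * q = 2 * (4 * q) by ring, bsN_even,
      show 4 * q = 2 * (2 * q) by ring, bsN_even, bsN_even]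

lemma bs4N_low (r : Nat) (h : r < 16) : bs4N r = TfN r := by
  interval_cases r <;> decide

-- any Nat is the xor of its high part and its low nibble
lemma nibble_decomp (x : Nat) : (16 * (x >>> 4)) ^^^ (x % 16) = x := by
  have hx4 : x >>> 4 = x / 16 := by rw [Nat.shiftRight_eq_div_pow]
  have h1 : (16 * (x >>> 4) ^^^ x % 16) / 16 = x >>> 4 := by
    have h := Nat.xor_div_two_pow (a := 16 * (x >>> 4)) (b := x % 16) (n := 4)
    norm_num at h
    exact h
  have h2 : (16 * (x >>> 4) ^^^ x % 16) % 16 = x % 16 := by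
    have h := Nat.xor_mod_two_pow (a := 16 * (x >>> 4)) (b := x % 16) (n := 4)
    norm_num at h
    exact h
  omega

-- the heart: four bit steps = one table step
lemma bs4N_eq (x : Nat) : bs4N x = (x >>> 4) ^^^ TfN (x % 16) := by
  conv_lhs => rw [← nibble_decomp x]
  rw [bs4N_xor, bs4N_mul16, bs4N_low _ (Nat.mod_lt x (by norm_num))]

lemma bsN_lt (x : Nat) (h : x < 65536) : bsN x < 65536 := by
  have h1 : x >>> 1 < 32768 := by rw [Nat.shiftRight_eq_div_pow]; omega
  unfold bsN
  split
  · have := Nat.xor_lt_two_pow (n := 16)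
      (show x >>> 1 < 2 ^ 16 from lt_of_lt_of_le h1 (by norm_num))
      (show (40961 : Nat) < 2 ^ 16 by norm_num)
    simpa using this
  · exact lt_trans h1 (by norm_num)

lemma xor_lt_65536 (a b : Nat) (ha : a < 65536) (hb : b < 65536) : a ^^^ b < 65536 := by
  have := Nat.xor_lt_two_pow (n := 16)
    (show a < 2 ^ 16 from lt_of_lt_of_le ha (by norm_num))
    (show b < 2 ^ 16 from lt_of_lt_of_le hb (by norm_num))
  simpa using this

-- the per-byte Nat equality
lemma step_eq (c n : Nat) (hc : c < 65536) (hn : n < 256) :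
    stepAN c n = bs4N (bs4N (c ^^^ n)) := by
  have hc4 : c >>> 4 < 4096 := by rw [Nat.shiftRight_eq_div_pow]; omega
  have hn4 : n >>> 4 < 16 := by rw [Nat.shiftRight_eq_div_pow]; omega
  have hcm : c % 16 < 16 := Nat.mod_lt _ (by norm_num)
  have hnm : n % 16 < 16 := Nat.mod_lt _ (by norm_num)
  have e1 : bs4N (c ^^^ n) =
      (((c >>> 4) % 4096) ^^^ TfN (c % 16) ^^^ TfN (n % 16)) ^^^ (n >>> 4) := by
    rw [bs4N_eq]
    have hsr : (c ^^^ n) >>> 4 = (c >>> 4) ^^^ (n >>> 4) := Nat.shiftRight_xor_distrib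
    have hmm : (c ^^^ n) % 16 = (c % 16) ^^^ (n % 16) := by
      simpa using Nat.xor_mod_two_pow (a := c) (b := n) (n := 4)
    rw [hsr, hmm, TfN_xor _ _ hcm hnm, Nat.mod_eq_of_lt hc4]
    ac_rfl
  set c1 : Nat := ((c >>> 4) % 4096) ^^^ TfN (c % 16) ^^^ TfN (n % 16) with hc1def
  have hc1 : c1 < 65536 := by
    apply xor_lt_65536
    · apply xor_lt_65536
      · omega
      · exact TfN_lt _ hcm
    · exact TfN_lt _ hnm
  have hc14 : c1 >>> 4 < 4096 := by rw [Nat.shiftRight_eq_div_pow]; omega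
  have e2 : bs4N (c1 ^^^ (n >>> 4)) =
      ((c1 >>> 4) % 4096) ^^^ TfN (c1 % 16) ^^^ TfN ((n >>> 4) % 16) := by
    rw [bs4N_eq]
    have h1 : (c1 ^^^ (n >>> 4)) >>> 4 = c1 >>> 4 := by
      rw [Nat.shiftRight_xor_distrib,
          show (n >>> 4) >>> 4 = 0 by
            rw [Nat.shiftRight_eq_div_pow, Nat.shiftRight_eq_div_pow]; omega,
          Nat.xor_zero]
    have h2 : (c1 ^^^ (n >>> 4)) % 16 = (c1 % 16) ^^^ ((n >>> 4) % 16) := by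
      simpa using Nat.xor_mod_two_pow (a := c1) (b := n >>> 4) (n := 4)
    rw [h1, h2, TfN_xor _ _ (Nat.mod_lt _ (by norm_num)) (Nat.mod_lt _ (by norm_num)),
        Nat.mod_eq_of_lt hc14]
    ac_rfl
  show ((c1 >>> 4) % 4096) ^^^ TfN (c1 % 16) ^^^ TfN ((n >>> 4) % 16) = _
  rw [show bs4N (c ^^^ n) = c1 ^^^ (n >>> 4) from e1, e2]

lemma bs4N_lt (x : Nat) (h : x < 65536) : bs4N x < 65536 :=
  bsN_lt _ (bsN_lt _ (bsN_lt _ (bsN_lt _ h)))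

lemma stepBN_lt (c n : Nat) (hc : c < 65536) (hn : n < 256) :
    bs4N (bs4N (c ^^^ n)) < 65536 :=
  bs4N_lt _ (bs4N_lt _ (xor_lt_65536 _ _ hc (by omega)))

-- Python's `x & mask` on an arbitrary (possibly negative) int is `x % (mask+1)`
lemma band15 (b : Int) : PySem.Int.band b 15 = b % 16 := by
  rcases b with m | m
  · show PySem.Int.band ((m : Nat) : Int) 15 = ((m : Nat) : Int) % 16
    rw [PySem.Int.band_of_nonneg (Int.natCast_nonneg m) (show (0:Int) ≤ 15 by norm_num)]
    rw [show ((m : Nat) : Int).toNat = m from Int.toNat_natCast m,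
        show (15 : Int).toNat = 15 from rfl,
        show m &&& 15 = m % 16 by simpa using Nat.and_two_pow_sub_one_eq_mod m 4]
    omega
  · unfold PySem.Int.band
    rw [if_neg (by omega), if_pos (show (0:Int) ≤ 15 by norm_num)]
    rw [show (15 : Int).toNat = 15 from rfl,
        show (-(Int.negSucc m) - 1).toNat = m by rw [Int.negSucc_eq]; omega,
        show 15 &&& m = m % 16 by
          rw [Nat.and_comm]; simpa using Nat.and_two_pow_sub_one_eq_mod m 4,
        Int.negSucc_eq]
    omega

lemma band255 (b : Int) : PySem.Int.band b 255 = b % 256 := by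
  rcases b with m | m
  · show PySem.Int.band ((m : Nat) : Int) 255 = ((m : Nat) : Int) % 256
    rw [PySem.Int.band_of_nonneg (Int.natCast_nonneg m) (show (0:Int) ≤ 255 by norm_num)]
    rw [show ((m : Nat) : Int).toNat = m from Int.toNat_natCast m,
        show (255 : Int).toNat = 255 from rfl,
        show m &&& 255 = m % 256 by simpa using Nat.and_two_pow_sub_one_eq_mod m 8]
    omega
  · unfold PySem.Int.band
    rw [if_neg (by omega), if_pos (show (0:Int) ≤ 255 by norm_num)]
    rw [show (255 : Int).toNat = 255 from rfl,
        show (-(Int.negSucc m) - 1).toNat = m by rw [Int.negSucc_eq]; omega,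
        show 255 &&& m = m % 256 by
          rw [Nat.and_comm]; simpa using Nat.and_two_pow_sub_one_eq_mod m 8,
        Int.negSucc_eq]
    omega

-- `x & (2^k - 1)` for a Nat cast, with the mask given as an Int literal
lemma band_mask_cast (x k : Nat) (mi : Int) (M : Nat) (hmi : mi = ((2 ^ k - 1 : Nat) : Int))
    (hM : M = 2 ^ k) : PySem.Int.band ((x : Nat) : Int) mi = ((x % M : Nat) : Int) := by
  rw [hmi, hM, PySem.Int.band_natCast, Nat.and_two_pow_sub_one_eq_mod]

lemma byte_low (b : Int) : PySem.Int.band b 15 = (((b % 256).toNat % 16 : Nat) : Int) := by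
  rw [band15]; omega

lemma byte_high (b : Int) :
    PySem.Int.band (b >>> (4 : Nat)) 15 = ((((b % 256).toNat >>> 4) % 16 : Nat) : Int) := by
  rw [band15, Nat.shiftRight_eq_div_pow]
  rcases b with m | m
  · rw [show (Int.ofNat m) = ((m : Nat) : Int) from rfl, ← Int.natCast_shiftRight,
        Nat.shiftRight_eq_div_pow]
    omega
  · rw [show (Int.negSucc m) >>> (4 : Nat) = Int.negSucc (m >>> 4) from rfl,
        Nat.shiftRight_eq_div_pow, Int.negSucc_eq, Int.negSucc_eq]
    omega

lemma cast_shift4 (x : Nat) : ((x : Nat) : Int) >>> (4 : Nat) = ((x >>> 4 : Nat) : Int) :=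
  (Int.natCast_shiftRight x 4).symm

lemma cast_of_nonneg (c : Int) (h0 : 0 ≤ c) : c = ((c.toNat : Nat) : Int) :=
  (Int.toNat_of_nonneg h0).symm

-- bridge: A's Int step is the cast of its Nat shadow
lemma stepA_bridge (c b : Int) (h0 : 0 ≤ c) :
    garminStep c b = (stepAN c.toNat (b % 256).toNat : Int) := by
  set cn : Nat := c.toNat with hcn
  set nb : Nat := (b % 256).toNat with hnb
  have hc : c = ((cn : Nat) : Int) := cast_of_nonneg c h0
  have hcl : PySem.Int.band c 15 = ((cn % 16 : Nat) : Int) := by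
    rw [hc, band_mask_cast cn 4 15 16 (by norm_num) (by norm_num)]
  have hsh : PySem.Int.band (c >>> (4 : Nat)) 0x0FFF = ((cn >>> 4 % 4096 : Nat) : Int) := by
    rw [hc, cast_shift4, band_mask_cast _ 12 _ 4096 (by norm_num) (by norm_num)]
  simp only [garminStep]
  rw [hcl, hsh, byte_low, byte_high, ← hnb,
      tbl_get _ (by omega), tbl_get _ (by omega),
      PySem.Int.bxor_natCast, PySem.Int.bxor_natCast]
  set c1 : Nat := (cn >>> 4 % 4096) ^^^ TfN (cn % 16) ^^^ TfN (nb % 16) with hc1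
  have hcl1 : PySem.Int.band ((c1 : Nat) : Int) 15 = ((c1 % 16 : Nat) : Int) := by
    rw [band_mask_cast c1 4 15 16 (by norm_num) (by norm_num)]
  have hsh1 : PySem.Int.band (((c1 : Nat) : Int) >>> (4 : Nat)) 0x0FFF
      = ((c1 >>> 4 % 4096 : Nat) : Int) := by
    rw [cast_shift4, band_mask_cast _ 12 _ 4096 (by norm_num) (by norm_num)]
  rw [hcl1, hsh1, tbl_get _ (by omega), tbl_get _ (by omega),
      PySem.Int.bxor_natCast, PySem.Int.bxor_natCast]
  rfl

lemma bit_bridge (x : Nat) : crcBitStep ((x : Nat) : Int) = ((bsN x : Nat) : Int) := by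
  have hb : PySem.Int.band ((x : Nat) : Int) 1 = ((x % 2 : Nat) : Int) := by
    rw [band_mask_cast x 1 1 2 (by norm_num) (by norm_num)]
  have hsh : ((x : Nat) : Int) >>> (1 : Nat) = ((x >>> 1 : Nat) : Int) :=
    (Int.natCast_shiftRight x 1).symm
  unfold crcBitStep bsN
  rw [hb, hsh, show (0xA001 : Int) = ((40961 : Nat) : Int) by norm_num,
      PySem.Int.bxor_natCast]
  rcases Nat.mod_two_eq_zero_or_one x with h | h <;> simp [h]

-- bridge: B's Int byte step is the cast of its Nat shadow
lemma stepB_bridge (c b : Int) (h0 : 0 ≤ c) :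
    crcByteStep c b = (bs4N (bs4N (c.toNat ^^^ (b % 256).toNat)) : Int) := by
  have hb : PySem.Int.band b 0xFF = (((b % 256).toNat : Nat) : Int) := by
    rw [band255]; omega
  have hx : PySem.Int.bxor c (((b % 256).toNat : Nat) : Int)
      = ((c.toNat ^^^ (b % 256).toNat : Nat) : Int) := by
    rw [cast_of_nonneg c h0, PySem.Int.bxor_natCast, Int.toNat_natCast]
  have hr : PySem.List.pyRange 0 8 1 = [0, 1, 2, 3, 4, 5, 6, 7] := by decide
  unfold crcByteStep
  rw [hb, hx, hr]
  simp only [List.foldl, bit_bridge]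
  rfl

lemma fold_eq (data : List Int) : ∀ (c : Int), 0 ≤ c → c < 65536 →
    data.foldl garminStep c = data.foldl crcByteStep c := by
  induction data with
  | nil => intro c _ _; rfl
  | cons b tl ih =>
    intro c h0 h1
    have hn : (b % 256).toNat < 256 := by omega
    have hc : c.toNat < 65536 := by omega
    have hstep : garminStep c b = crcByteStep c b := by
      rw [stepA_bridge c b h0, stepB_bridge c b h0, step_eq _ _ hc hn]
    have hbb : crcByteStep c b = (bs4N (bs4N (c.toNat ^^^ (b % 256).toNat)) : Int) :=
      stepB_bridge c b h0
    have hlt : bs4N (bs4N (c.toNat ^^^ (b % 256).toNat)) < 65536 := stepBN_lt _ _ hc hn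
    simp only [List.foldl]
    rw [hstep, hbb]
    exact ih _ (Int.natCast_nonneg _) (by exact_mod_cast hlt)

-- ===== VERDICT (by name: the statement is the Claim_ definition above) =====
theorem garmin_crc_spec : Claim_equal_garmin_crc := by
  intro data _
  unfold Spec_garmin_crc garmin_crc garmin_crc_alt
  exact fold_eq data 0 (by norm_num) (by norm_num)
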